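-- pv_equiv track=rewrite | github.com/BabyChrist666/superposition-explorer | superposition_explorer/visualization.py | plot_feature_clusters
-- ===== SOURCE A (Python) =====
-- from typing import Optional, List, Dict, Any
--
-- def plot_feature_clusters(
--     clusters: List[List[int]],
--     n_features: int,
-- ) -> str:
--     """
--     Visualize feature clustering.
--     """
--     lines = ["Feature Clusters:"]
--     lines.append("-" * 50)
--
--     # Create feature -> cluster mapping
--     feature_to_cluster = {}
--     for i, cluster in enumerate(clusters):
--         for f in cluster:
--             feature_to_cluster[f] = i
--
--     # Display clusters
--     for i, cluster in enumerate(clusters):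
--         if len(cluster) > 1:
--             features = ", ".join(f"F{f}" for f in cluster[:10])
--             if len(cluster) > 10:
--                 features += f", ... (+{len(cluster) - 10} more)"
--             lines.append(f"  Cluster {i}: {features}")
--
--     # Summary
--     singleton_count = sum(1 for c in clusters if len(c) == 1)
--     multi_count = sum(1 for c in clusters if len(c) > 1)
--
--     lines.append("-" * 50)
--     lines.append(f"Singletons: {singleton_count}, Multi-feature clusters: {multi_count}")
--
--     return "\n".join(lines)
-- ===== SOURCE B (Python) =====
-- def plot_feature_clusters(clusters, n_features):
--     def go(i, rest):
--         # recursion over the cluster list; builds the body back-to-front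
--         if not rest:
--             return [], 0, 0
--         body, singles, multis = go(i + 1, rest[1:])
--         c = rest[0]
--         if len(c) > 1:
--             shown = ", ".join("F{}".format(f) for f in c[:10])
--             if len(c) > 10:
--                 shown += ", ... (+{} more)".format(len(c) - 10)
--             return ["  Cluster {}: {}".format(i, shown)] + body, singles, multis + 1
--         if len(c) == 1:
--             return body, singles + 1, multis
--         return body, singles, multis
--
--     body, singles, multis = go(0, clusters)
--     sep = "-" * 50
--     return "\n".join(
--         ["Feature Clusters:", sep]
--         + body
--         + [sep, "Singletons: {}, Multi-feature clusters: {}".format(singles, multis)]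
--     )
-- ===== Notes on version B (the rewrite author's own statement) =====
-- stated objective: alternative
-- what changed: B replaces A's staged iterative passes (dead feature->cluster dict build, append-based display loop, two separate count comprehensions) with a single structural recursion over the cluster list that returns (body lines, singleton count, multi count) in one traversal, building the body back-to-front by prepending.
import Mathlib
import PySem

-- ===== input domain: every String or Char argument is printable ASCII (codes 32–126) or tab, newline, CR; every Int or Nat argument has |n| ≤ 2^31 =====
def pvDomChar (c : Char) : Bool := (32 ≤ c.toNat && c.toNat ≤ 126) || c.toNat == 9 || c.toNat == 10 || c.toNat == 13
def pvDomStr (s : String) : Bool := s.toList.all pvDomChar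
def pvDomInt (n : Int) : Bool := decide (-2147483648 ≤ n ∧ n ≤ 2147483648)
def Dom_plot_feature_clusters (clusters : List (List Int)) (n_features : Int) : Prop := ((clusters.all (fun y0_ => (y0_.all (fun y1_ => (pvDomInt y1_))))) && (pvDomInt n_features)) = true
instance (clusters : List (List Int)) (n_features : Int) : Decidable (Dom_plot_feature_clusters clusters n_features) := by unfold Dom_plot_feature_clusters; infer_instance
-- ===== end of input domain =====

-- ===== PORT A =====
-- B replaces A's staged passes (dead dict build, display loop, two count comprehensions) by one
-- structural recursion returning (body lines, singleton count, multi count); objective: alternative.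

def pvDashes : String := "--------------------------------------------------"

-- the f-string '  Cluster {i}: {features}' with the cluster[:10] slice and '+N more' suffix
def pvLine (i : Int) (c : List Int) : String :=
  let features := PySem.Str.join ", " ((PySem.List.slice c none (some 10)).map (fun f => "F" ++ PySem.Int.toStr f))
  let features := if ((c.length : Int) > 10) then features ++ ", ... (+" ++ PySem.Int.toStr ((c.length : Int) - 10) ++ " more)" else features
  "  Cluster " ++ PySem.Int.toStr i ++ ": " ++ features

def plot_feature_clusters (clusters : List (List Int)) (n_features : Int) : String :=
  let lines : List String := ["Feature Clusters:"]
  let lines := lines ++ [pvDashes]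
  -- feature -> cluster mapping (built by A, never used afterwards)
  let _feature_to_cluster : PySem.Dict Int Int :=
    (PySem.List.enumerate clusters).foldl
      (fun d p => p.2.foldl (fun d f => d.insert f p.1) d) PySem.Dict.empty
  let lines := (PySem.List.enumerate clusters).foldl
      (fun ls p => if ((p.2.length : Int) > 1) then ls ++ [pvLine p.1 p.2] else ls) lines
  let singleton_count : Int := clusters.foldl (fun n c => if ((c.length : Int) = 1) then n + 1 else n) 0
  let multi_count : Int := clusters.foldl (fun n c => if ((c.length : Int) > 1) then n + 1 else n) 0
  let lines := lines ++ [pvDashes]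
  let lines := lines ++ ["Singletons: " ++ PySem.Int.toStr singleton_count ++ ", Multi-feature clusters: " ++ PySem.Int.toStr multi_count]
  PySem.Str.join "\n" lines

-- ===== PORT B =====
-- def go(i, rest): structural recursion over the cluster list, body built back-to-front by prepending
def pvGo (i : Int) : List (List Int) → List String × Int × Int
  | [] => ([], 0, 0)
  | c :: rest =>
    let r := pvGo (i + 1) rest
    if ((c.length : Int) > 1) then
      let shown := PySem.Str.join ", " ((PySem.List.slice c none (some 10)).map (fun f => "F" ++ PySem.Int.toStr f))
      let shown := if ((c.length : Int) > 10) then shown ++ ", ... (+" ++ PySem.Int.toStr ((c.length : Int) - 10) ++ " more)" else shown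
      (("  Cluster " ++ PySem.Int.toStr i ++ ": " ++ shown) :: r.1, r.2.1, r.2.2 + 1)
    else if ((c.length : Int) = 1) then (r.1, r.2.1 + 1, r.2.2)
    else r

def plot_feature_clusters_alt (clusters : List (List Int)) (n_features : Int) : String :=
  let r := pvGo 0 clusters
  let sep := "--------------------------------------------------"
  PySem.Str.join "\n"
    (["Feature Clusters:", sep] ++ r.1 ++
     [sep, "Singletons: " ++ PySem.Int.toStr r.2.1 ++ ", Multi-feature clusters: " ++ PySem.Int.toStr r.2.2])

-- ===== PRECONDITION & SPEC =====
def Spec_plot_feature_clusters (clusters : List (List Int)) (n_features : Int) (out : String) : Prop := out = plot_feature_clusters_alt clusters n_features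
instance (clusters : List (List Int)) (n_features : Int) (out : String) : Decidable (Spec_plot_feature_clusters clusters n_features out) := by unfold Spec_plot_feature_clusters; infer_instance

-- ===== CLAIM =====
def Claim_equal_plot_feature_clusters : Prop := ∀ (clusters : List (List Int)) (n_features : Int), Dom_plot_feature_clusters clusters n_features → Spec_plot_feature_clusters clusters n_features (plot_feature_clusters clusters n_features)

-- ===== LEMMAS AND PROOFS =====

-- a counting foldl from s is s plus the length of the filtered list
theorem pvFold_cnt (p : List Int → Prop) [DecidablePred p] (l : List (List Int)) (s : Int) :
    l.foldl (fun n c => if p c then n + 1 else n) s = s + ((l.filter (fun c => decide (p c))).length : Int) := by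
  induction l generalizing s with
  | nil => simp
  | cons x xs ih =>
    by_cases h : p x <;> simp [h, ih] <;> push_cast <;> ring

-- B's recursion computes A's filtered line list and both counts in one traversal
theorem pvGo_eq (l : List (List Int)) (i : Int) :
    pvGo i l =
      (((PySem.List.enumerate l i).filter (fun p => decide ((p.2.length : Int) > 1))).map (fun p => pvLine p.1 p.2),
       ((l.filter (fun c => decide ((c.length : Int) = 1))).length : Int),
       ((l.filter (fun c => decide ((c.length : Int) > 1))).length : Int)) := by
  induction l generalizing i with
  | nil => simp [pvGo]
  | cons c rest ih =>
    rw [pvGo, ih]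
    by_cases h1 : 1 < c.length
    · have h2 : ¬ (c.length = 1) := by omega
      simp [PySem.List.enumerate_cons, List.filter_cons, h1, h2, pvLine]
    · by_cases h2 : c.length = 1
      · simp [PySem.List.enumerate_cons, List.filter_cons, h1, h2]
      · simp [PySem.List.enumerate_cons, List.filter_cons, h1, h2]

-- ===== VERDICT =====
theorem plot_feature_clusters_spec : Claim_equal_plot_feature_clusters := by
  intro clusters n_features _
  show plot_feature_clusters clusters n_features = plot_feature_clusters_alt clusters n_features
  simp only [plot_feature_clusters, plot_feature_clusters_alt, pvGo_eq]
  rw [      PySem.List.foldl_append_ite (fun p => ((p.2.length : Int) > 1))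
        (fun p => pvLine p.1 p.2) (PySem.List.enumerate clusters 0)
        (["Feature Clusters:"] ++ [pvDashes]),
      pvFold_cnt (fun c => ((c.length : Int) = 1)) clusters 0,
      pvFold_cnt (fun c => ((c.length : Int) > 1)) clusters 0]
  simp [pvDashes, pvLine]
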